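-- pv_equiv track=rewrite | github.com/CazyUndee/TileFlow | tileflow/autotune.py | _sample_sizes
-- ===== SOURCE A (Python) =====
-- from typing import Dict, Iterable, List, NamedTuple
--
-- TileSizeMB = int  # semantic alias for clarity
--
-- def _aligned(mb: TileSizeMB, align_mb: int) -> TileSizeMB:
--     return max(align_mb, int(round(mb / align_mb)) * align_mb)
--
-- def _sample_sizes(
--     low_mb: int, high_mb: int, count: int, align_mb: int
-- ) -> List[TileSizeMB]:
--     if count <= 1 or low_mb >= high_mb:
--         return [max(align_mb, _aligned(low_mb, align_mb))]
--     span = high_mb - low_mb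
--     values: set[TileSizeMB] = set()
--     for i in range(count):
--         frac = i / (count - 1)
--         values.add(_aligned(low_mb + int(span * frac), align_mb))
--     return sorted(values)
-- ===== SOURCE B (Python) =====
-- from typing import List
--
-- TileSizeMB = int  # semantic alias for clarity
--
-- def _aligned(mb: TileSizeMB, align_mb: int) -> TileSizeMB:
--     return max(align_mb, int(round(mb / align_mb)) * align_mb)
--
-- def _sample_sizes(
--     low_mb: int, high_mb: int, count: int, align_mb: int
-- ) -> List[TileSizeMB]:
--     if count <= 1 or low_mb >= high_mb:
--         return [max(align_mb, _aligned(low_mb, align_mb))]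
--
--     def sample(i: int) -> TileSizeMB:
--         frac = i / (count - 1)
--         return _aligned(low_mb + int((high_mb - low_mb) * frac), align_mb)
--
--     # build the sorted deduplicated result back-to-front: walk the indices in
--     # DESCENDING order (the aligned samples are non-decreasing in i) and prepend
--     # each value unless it already heads the list — no set, no final sort.
--     out: List[TileSizeMB] = []
--     for i in reversed(range(count)):
--         v = sample(i)
--         if not out or out[0] != v:
--             out = [v] + out
--     return out
-- ===== Notes on version B (the rewrite author's own statement) =====
-- stated objective: alternative
-- what changed: B drops A's hash set and final sorted() call: it walks the indices in descending order and prepends each aligned sample unless it equals the current list head, building the sorted deduplicated list back-to-front in one pass (correct because the aligned samples are non-decreasing in i, which the Lean proof establishes).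
import Mathlib
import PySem

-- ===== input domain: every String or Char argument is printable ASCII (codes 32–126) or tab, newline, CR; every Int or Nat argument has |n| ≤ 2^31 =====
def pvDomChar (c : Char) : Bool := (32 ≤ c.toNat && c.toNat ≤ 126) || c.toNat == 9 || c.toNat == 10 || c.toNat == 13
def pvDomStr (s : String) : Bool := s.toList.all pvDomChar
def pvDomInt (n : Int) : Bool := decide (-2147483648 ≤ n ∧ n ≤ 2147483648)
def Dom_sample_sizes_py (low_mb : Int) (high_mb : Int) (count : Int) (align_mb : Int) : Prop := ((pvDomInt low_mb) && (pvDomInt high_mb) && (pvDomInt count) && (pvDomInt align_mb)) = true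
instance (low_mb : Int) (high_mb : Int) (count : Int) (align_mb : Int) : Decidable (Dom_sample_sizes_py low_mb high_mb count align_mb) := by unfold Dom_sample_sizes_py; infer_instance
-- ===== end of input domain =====

-- B replaces A's hash-set accumulation plus final sort by a single descending pass that
-- prepends each aligned sample unless it equals the current head (the samples are proved
-- non-decreasing in i); same return values everywhere on Pre_.

-- ===== PORT A =====
-- Python floats: every float arising here is a finite IEEE binary64 value, hence an exact
-- rational.  pvRnd models correctly-rounded (nearest, ties-to-even) binary64 rounding of a
-- rational; it is exact for the magnitudes reachable here (all quotients and products lie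
-- well inside the normal range, so no overflow and no subnormals arise).

-- round-half-to-even of a rational, as Python's round(float) (exact: a float is a rational)
def pvRhe (x : ℚ) : Int :=
  if x - (⌊x⌋ : ℚ) < 1/2 then ⌊x⌋
  else if 1/2 < x - (⌊x⌋ : ℚ) then ⌊x⌋ + 1
  else if ⌊x⌋ % 2 = 0 then ⌊x⌋ else ⌊x⌋ + 1

-- ⌊log₂ x⌋ for a positive rational
def pvIlog2 (x : ℚ) : Int :=
  if x < (2:ℚ) ^ ((Nat.log2 x.num.natAbs : Int) - (Nat.log2 x.den : Int))
  then (Nat.log2 x.num.natAbs : Int) - (Nat.log2 x.den : Int) - 1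
  else (Nat.log2 x.num.natAbs : Int) - (Nat.log2 x.den : Int)

-- nearest binary64 to a positive rational (53-bit significand, ties to even)
def pvRndPos (a : ℚ) : ℚ :=
  ((pvRhe (a * (2:ℚ) ^ (52 - pvIlog2 a)) : ℚ)) * (2:ℚ) ^ (pvIlog2 a - 52)

-- nearest binary64 to a rational (IEEE round-to-nearest-even; exact in the normal range)
def pvRnd (x : ℚ) : ℚ :=
  if x = 0 then 0 else if x < 0 then -pvRndPos (-x) else pvRndPos x

-- Python int(float): truncation toward zero
def pvTrunc (x : ℚ) : Int := if x < 0 then ⌈x⌉ else ⌊x⌋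

-- _aligned(mb, align_mb) = max(align_mb, int(round(mb / align_mb)) * align_mb);
-- 'mb / align_mb' is Python true division = the binary64 nearest the exact quotient
def alignedPy (mb : Int) (align : Int) : Int :=
  max align (pvRhe (pvRnd ((mb : ℚ) / (align : ℚ))) * align)

def sample_sizes_py (low_mb : Int) (high_mb : Int) (count : Int) (align_mb : Int) : List Int :=
  if count ≤ 1 ∨ low_mb ≥ high_mb then [max align_mb (alignedPy low_mb align_mb)]
  else
    -- for i in range(count): values.add(_aligned(low_mb + int(span * (i/(count-1))), align_mb))
    PySem.List.sorted
      ((PySem.List.pyRange 0 count 1).foldl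
        (fun s (i : Int) => PySem.Set.add s
          (alignedPy (low_mb + pvTrunc (pvRnd (((high_mb - low_mb : Int) : ℚ) * pvRnd ((i : ℚ) / ((count - 1 : Int) : ℚ))))) align_mb))
        PySem.Set.empty)
      (fun x => x) false

-- ===== PORT B =====
-- B's local helper 'sample(i)': frac = i/(count-1); _aligned(low_mb + int((high_mb-low_mb)*frac), align_mb)
def pvSample (low_mb : Int) (high_mb : Int) (count : Int) (align_mb : Int) (i : Int) : Int :=
  alignedPy (low_mb + pvTrunc (pvRnd (((high_mb - low_mb : Int) : ℚ) * pvRnd ((i : ℚ) / ((count - 1 : Int) : ℚ))))) align_mb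

def sample_sizes_py_alt (low_mb : Int) (high_mb : Int) (count : Int) (align_mb : Int) : List Int :=
  if count ≤ 1 ∨ low_mb ≥ high_mb then [max align_mb (alignedPy low_mb align_mb)]
  else
    -- for i in reversed(range(count)): v = sample(i); if not out or out[0] != v: out = [v] + out
    ((PySem.List.pyRange 0 count 1).reverse).foldl
      (fun out (i : Int) =>
        if out.head? = some (pvSample low_mb high_mb count align_mb i) then out
        else pvSample low_mb high_mb count align_mb i :: out)
      []

-- ===== PRECONDITION & SPEC =====
-- Pre_ excludes only align_mb = 0, on which _aligned raises ZeroDivisionError in Python (A and B alike).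
def Pre_sample_sizes_py (low_mb : Int) (high_mb : Int) (count : Int) (align_mb : Int) : Prop := align_mb ≠ 0
instance (low_mb : Int) (high_mb : Int) (count : Int) (align_mb : Int) : Decidable (Pre_sample_sizes_py low_mb high_mb count align_mb) := by unfold Pre_sample_sizes_py; infer_instance
def pvWitness_sample_sizes_py : Int × Int × Int × Int := (0, 10, 3, 2)

def Spec_sample_sizes_py (low_mb : Int) (high_mb : Int) (count : Int) (align_mb : Int) (out : List Int) : Prop := out = sample_sizes_py_alt low_mb high_mb count align_mb
instance (low_mb : Int) (high_mb : Int) (count : Int) (align_mb : Int) (out : List Int) : Decidable (Spec_sample_sizes_py low_mb high_mb count align_mb out) := by unfold Spec_sample_sizes_py; infer_instance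

-- ===== CLAIM (what is proved, stated in full; the proofs are below) =====
def Claim_equal_sample_sizes_py : Prop := ∀ (low_mb : Int) (high_mb : Int) (count : Int) (align_mb : Int), Dom_sample_sizes_py low_mb high_mb count align_mb → Pre_sample_sizes_py low_mb high_mb count align_mb → Spec_sample_sizes_py low_mb high_mb count align_mb (sample_sizes_py low_mb high_mb count align_mb)

-- ===== LEMMAS AND PROOFS =====

lemma pvRhe_floor_le (x : ℚ) : ⌊x⌋ ≤ pvRhe x := by
  unfold pvRhe; split_ifs <;> omega

lemma pvRhe_le_floor_add_one (x : ℚ) : pvRhe x ≤ ⌊x⌋ + 1 := by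
  unfold pvRhe; split_ifs <;> omega

lemma pvRhe_mono {x y : ℚ} (h : x ≤ y) : pvRhe x ≤ pvRhe y := by
  rcases lt_or_ge ⌊x⌋ ⌊y⌋ with hf | hf
  · have h1 := pvRhe_le_floor_add_one x
    have h2 := pvRhe_floor_le y
    omega
  · have hf' : ⌊x⌋ = ⌊y⌋ := le_antisymm (Int.floor_le_floor h) hf
    unfold pvRhe
    rw [hf']
    have hxy : x - (⌊y⌋:ℚ) ≤ y - (⌊y⌋:ℚ) := by linarith
    split_ifs <;> (try omega) <;> (exfalso; linarith)

lemma pvIlog2_spec {x : ℚ} (hx : 0 < x) :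
    (2:ℚ) ^ (pvIlog2 x) ≤ x ∧ x < (2:ℚ) ^ (pvIlog2 x + 1) := by
  have hnum : 0 < x.num := Rat.num_pos.mpr hx
  set p : ℕ := x.num.natAbs with hp
  set q : ℕ := x.den with hq
  have hp0 : p ≠ 0 := by simpa [hp] using (by omega : x.num.natAbs ≠ 0)
  have hq0 : q ≠ 0 := x.den_nz
  have hxpq : x = (p : ℚ) / (q : ℚ) := by
    have hpq : ((p : ℕ) : ℚ) = ((x.num : ℤ) : ℚ) := by
      rw [hp]
      have h1 : ((x.num.natAbs : ℕ) : ℤ) = x.num := Int.natAbs_of_nonneg (le_of_lt hnum)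
      have h2 : ((x.num.natAbs : ℕ) : ℚ) = (((x.num.natAbs : ℕ) : ℤ) : ℚ) := (Int.cast_natCast _).symm
      rw [h2, h1]
    rw [hpq, hq]
    exact (Rat.num_div_den x).symm
  have hqpos : (0:ℚ) < (q : ℚ) := by exact_mod_cast Nat.pos_of_ne_zero hq0
  have hple : (2:ℚ) ^ ((Nat.log2 p : Int)) ≤ (p : ℚ) := by
    have := Nat.log2_self_le hp0
    have h2 : ((2 ^ Nat.log2 p : ℕ) : ℚ) ≤ ((p : ℕ) : ℚ) := by exact_mod_cast this
    calc (2:ℚ) ^ ((Nat.log2 p : Int)) = ((2 ^ Nat.log2 p : ℕ) : ℚ) := by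
          push_cast; rw [zpow_natCast]
      _ ≤ (p : ℚ) := h2
  have hplt : (p : ℚ) < (2:ℚ) ^ ((Nat.log2 p : Int) + 1) := by
    have := Nat.lt_log2_self (n := p)
    have h2 : ((p : ℕ) : ℚ) < ((2 ^ (Nat.log2 p + 1) : ℕ) : ℚ) := by exact_mod_cast this
    calc (p : ℚ) < ((2 ^ (Nat.log2 p + 1) : ℕ) : ℚ) := h2
      _ = (2:ℚ) ^ ((Nat.log2 p : Int) + 1) := by push_cast; rw [← zpow_natCast]; push_cast; ring_nf
  have hqle : (2:ℚ) ^ ((Nat.log2 q : Int)) ≤ (q : ℚ) := by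
    have := Nat.log2_self_le hq0
    have h2 : ((2 ^ Nat.log2 q : ℕ) : ℚ) ≤ ((q : ℕ) : ℚ) := by exact_mod_cast this
    calc (2:ℚ) ^ ((Nat.log2 q : Int)) = ((2 ^ Nat.log2 q : ℕ) : ℚ) := by
          push_cast; rw [zpow_natCast]
      _ ≤ (q : ℚ) := h2
  have hqlt : (q : ℚ) < (2:ℚ) ^ ((Nat.log2 q : Int) + 1) := by
    have := Nat.lt_log2_self (n := q)
    have h2 : ((q : ℕ) : ℚ) < ((2 ^ (Nat.log2 q + 1) : ℕ) : ℚ) := by exact_mod_cast this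
    calc (q : ℚ) < ((2 ^ (Nat.log2 q + 1) : ℕ) : ℚ) := h2
      _ = (2:ℚ) ^ ((Nat.log2 q : Int) + 1) := by push_cast; rw [← zpow_natCast]; push_cast; ring_nf
  set e0 : Int := (Nat.log2 p : Int) - (Nat.log2 q : Int) with he0
  have hppos : (0:ℚ) < (p : ℚ) := by exact_mod_cast Nat.pos_of_ne_zero hp0
  have hupper : x < (2:ℚ) ^ (e0 + 1) := by
    rw [hxpq, div_lt_iff₀ hqpos]
    calc (p : ℚ) < (2:ℚ) ^ ((Nat.log2 p : Int) + 1) := hplt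
      _ = (2:ℚ) ^ (e0 + 1) * (2:ℚ) ^ ((Nat.log2 q : Int)) := by
          rw [← zpow_add₀ (by norm_num : (2:ℚ) ≠ 0)]; congr 1; omega
      _ ≤ (2:ℚ) ^ (e0 + 1) * (q : ℚ) := by
          apply mul_le_mul_of_nonneg_left hqle (le_of_lt (zpow_pos (by norm_num) _))
  have hlower : (2:ℚ) ^ (e0 - 1) < x := by
    rw [hxpq, lt_div_iff₀ hqpos]
    calc (2:ℚ) ^ (e0 - 1) * (q : ℚ) < (2:ℚ) ^ (e0 - 1) * (2:ℚ) ^ ((Nat.log2 q : Int) + 1) := by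
          apply mul_lt_mul_of_pos_left hqlt (zpow_pos (by norm_num) _)
      _ = (2:ℚ) ^ ((Nat.log2 p : Int)) := by
          rw [← zpow_add₀ (by norm_num : (2:ℚ) ≠ 0)]; congr 1; omega
      _ ≤ (p : ℚ) := hple
  unfold pvIlog2
  rw [← hp, ← hq, ← he0]
  split_ifs with hcase
  · refine ⟨le_of_lt hlower, ?_⟩
    rw [show e0 - 1 + 1 = e0 from by omega]
    exact hcase
  · exact ⟨le_of_not_gt hcase, hupper⟩

lemma pvRndPos_bounds {x : ℚ} (hx : 0 < x) :
    (2:ℚ) ^ (pvIlog2 x) ≤ pvRndPos x ∧ pvRndPos x ≤ (2:ℚ) ^ (pvIlog2 x + 1) := by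
  obtain ⟨hlo, hhi⟩ := pvIlog2_spec hx
  set e : Int := pvIlog2 x with he
  set c : ℚ := (2:ℚ) ^ (52 - e) with hc
  have hcpos : (0:ℚ) < c := zpow_pos (by norm_num) _
  have hm_lo : (2:ℚ)^(52:ℤ) ≤ x * c := by
    calc (2:ℚ)^(52:ℤ) = (2:ℚ)^e * c := by
          rw [hc, ← zpow_add₀ (by norm_num : (2:ℚ) ≠ 0)]; congr 1; omega
      _ ≤ x * c := mul_le_mul_of_nonneg_right hlo (le_of_lt hcpos)
  have hm_hi : x * c < (2:ℚ)^(53:ℤ) := by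
    calc x * c < (2:ℚ)^(e+1) * c := mul_lt_mul_of_pos_right hhi hcpos
      _ = (2:ℚ)^(53:ℤ) := by rw [hc, ← zpow_add₀ (by norm_num : (2:ℚ) ≠ 0)]; congr 1; omega
  have hfl_lo : (2:ℤ)^(52:ℕ) ≤ ⌊x * c⌋ := by
    apply Int.le_floor.mpr
    calc ((2^52 : ℤ) : ℚ) = (2:ℚ)^(52:ℤ) := by norm_num
      _ ≤ x * c := hm_lo
  have hfl_hi : ⌊x * c⌋ < (2:ℤ)^(53:ℕ) := by
    have h2 : ((⌊x * c⌋ : ℤ) : ℚ) < ((2^53 : ℤ) : ℚ) := by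
      calc ((⌊x * c⌋ : ℤ) : ℚ) ≤ x * c := Int.floor_le _
        _ < (2:ℚ)^(53:ℤ) := hm_hi
        _ = ((2^53 : ℤ) : ℚ) := by norm_num
    exact_mod_cast h2
  have hrhe_lo : (2:ℤ)^(52:ℕ) ≤ pvRhe (x * c) := le_trans hfl_lo (pvRhe_floor_le _)
  have hrhe_hi : pvRhe (x * c) ≤ (2:ℤ)^(53:ℕ) := le_trans (pvRhe_le_floor_add_one _) (by omega)
  unfold pvRndPos
  rw [← he, ← hc]
  have hd : (0:ℚ) < (2:ℚ) ^ (e - 52) := zpow_pos (by norm_num) _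
  constructor
  · calc (2:ℚ) ^ e = ((2^52 : ℤ) : ℚ) * (2:ℚ) ^ (e - 52) := by
          rw [show ((2^52 : ℤ) : ℚ) = (2:ℚ)^(52:ℤ) from by norm_num,
            ← zpow_add₀ (by norm_num : (2:ℚ) ≠ 0)]
          congr 1; omega
      _ ≤ (pvRhe (x * c) : ℚ) * (2:ℚ) ^ (e - 52) := by
          apply mul_le_mul_of_nonneg_right _ (le_of_lt hd); exact_mod_cast hrhe_lo
  · calc (pvRhe (x * c) : ℚ) * (2:ℚ) ^ (e - 52) ≤ ((2^53 : ℤ) : ℚ) * (2:ℚ) ^ (e - 52) := by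
          apply mul_le_mul_of_nonneg_right _ (le_of_lt hd); exact_mod_cast hrhe_hi
      _ = (2:ℚ) ^ (e + 1) := by
          rw [show ((2^53 : ℤ) : ℚ) = (2:ℚ)^(53:ℤ) from by norm_num,
            ← zpow_add₀ (by norm_num : (2:ℚ) ≠ 0)]
          congr 1; omega

lemma pvRndPos_mono {a b : ℚ} (ha : 0 < a) (hb : 0 < b) (h : a ≤ b) :
    pvRndPos a ≤ pvRndPos b := by
  obtain ⟨halo, hahi⟩ := pvIlog2_spec ha
  obtain ⟨hblo, hbhi⟩ := pvIlog2_spec hb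
  have he : pvIlog2 a ≤ pvIlog2 b := by
    by_contra hcon
    push_neg at hcon
    have h1 : (2:ℚ) ^ (pvIlog2 b + 1) ≤ (2:ℚ) ^ (pvIlog2 a) :=
      zpow_le_zpow_right₀ (by norm_num) (by omega)
    linarith
  rcases eq_or_lt_of_le he with heq | hlt
  · unfold pvRndPos
    rw [← heq]
    apply mul_le_mul_of_nonneg_right _ (le_of_lt (zpow_pos (by norm_num) _))
    have : a * (2:ℚ) ^ (52 - pvIlog2 a) ≤ b * (2:ℚ) ^ (52 - pvIlog2 a) :=
      mul_le_mul_of_nonneg_right h (le_of_lt (zpow_pos (by norm_num) _))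
    exact_mod_cast pvRhe_mono this
  · have h1 : pvRndPos a ≤ (2:ℚ) ^ (pvIlog2 a + 1) := (pvRndPos_bounds ha).2
    have h2 : (2:ℚ) ^ (pvIlog2 b) ≤ pvRndPos b := (pvRndPos_bounds hb).1
    have h3 : (2:ℚ) ^ (pvIlog2 a + 1) ≤ (2:ℚ) ^ (pvIlog2 b) :=
      zpow_le_zpow_right₀ (by norm_num) (by omega)
    linarith

lemma pvRndPos_pos {a : ℚ} (ha : 0 < a) : 0 < pvRndPos a := by
  have h1 := (pvRndPos_bounds ha).1
  have h2 : (0:ℚ) < (2:ℚ) ^ (pvIlog2 a) := zpow_pos (by norm_num) _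
  linarith

lemma pvRnd_of_pos {x : ℚ} (h : 0 < x) : pvRnd x = pvRndPos x := by
  unfold pvRnd
  rw [if_neg (ne_of_gt h), if_neg (not_lt.mpr (le_of_lt h))]

lemma pvRnd_of_neg {x : ℚ} (h : x < 0) : pvRnd x = -pvRndPos (-x) := by
  unfold pvRnd
  rw [if_neg (ne_of_lt h), if_pos h]

lemma pvRnd_mono {x y : ℚ} (h : x ≤ y) : pvRnd x ≤ pvRnd y := by
  rcases lt_trichotomy x 0 with hx | hx | hx
  · rcases lt_trichotomy y 0 with hy | hy | hy
    · rw [pvRnd_of_neg hx, pvRnd_of_neg hy]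
      have := pvRndPos_mono (neg_pos.mpr hy) (neg_pos.mpr hx) (by linarith)
      linarith
    · rw [pvRnd_of_neg hx, hy]
      unfold pvRnd
      rw [if_pos rfl]
      have := pvRndPos_pos (neg_pos.mpr hx)
      linarith
    · rw [pvRnd_of_neg hx, pvRnd_of_pos hy]
      have h1 := pvRndPos_pos (neg_pos.mpr hx)
      have h2 := pvRndPos_pos hy
      linarith
  · subst hx
    rcases lt_trichotomy y 0 with hy | hy | hy
    · linarith
    · subst hy; exact le_refl _
    · rw [pvRnd_of_pos hy]
      unfold pvRnd
      rw [if_pos rfl]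
      exact le_of_lt (pvRndPos_pos hy)
  · have hy : 0 < y := lt_of_lt_of_le hx h
    rw [pvRnd_of_pos hx, pvRnd_of_pos hy]
    exact pvRndPos_mono hx hy h

lemma pvTrunc_mono {x y : ℚ} (h : x ≤ y) : pvTrunc x ≤ pvTrunc y := by
  unfold pvTrunc
  split_ifs with h1 h2 h3
  · exact Int.ceil_le_ceil h
  · have ha : ⌈x⌉ ≤ (0:ℤ) := Int.ceil_le.mpr (by exact_mod_cast le_of_lt h1)
    have hb : (0:ℤ) ≤ ⌊y⌋ := Int.floor_nonneg.mpr (le_of_not_gt h2)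
    omega
  · linarith
  · exact Int.floor_le_floor h

lemma alignedPy_mono {m1 m2 align : Int} (h : m1 ≤ m2) :
    alignedPy m1 align ≤ alignedPy m2 align := by
  unfold alignedPy
  rcases lt_trichotomy align 0 with hneg | hz | hpos
  · have halq : ((align : ℚ)) < 0 := by exact_mod_cast hneg
    have hq : (m2 : ℚ) / (align : ℚ) ≤ (m1 : ℚ) / (align : ℚ) := by
      rw [div_eq_mul_inv, div_eq_mul_inv]
      exact mul_le_mul_of_nonpos_right (by exact_mod_cast h) (inv_nonpos.mpr (le_of_lt halq))
    have hr := pvRhe_mono (pvRnd_mono hq)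
    have hm : pvRhe (pvRnd ((m1:ℚ)/(align:ℚ))) * align ≤ pvRhe (pvRnd ((m2:ℚ)/(align:ℚ))) * align :=
      mul_le_mul_of_nonpos_right hr (le_of_lt hneg)
    exact max_le_max (le_refl _) hm
  · subst hz
    simp
  · have halq : (0:ℚ) < (align : ℚ) := by exact_mod_cast hpos
    have hq : (m1 : ℚ) / (align : ℚ) ≤ (m2 : ℚ) / (align : ℚ) := by
      rw [div_eq_mul_inv, div_eq_mul_inv]
      exact mul_le_mul_of_nonneg_right (by exact_mod_cast h) (inv_nonneg.mpr (le_of_lt halq))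
    have hr := pvRhe_mono (pvRnd_mono hq)
    have hm : pvRhe (pvRnd ((m1:ℚ)/(align:ℚ))) * align ≤ pvRhe (pvRnd ((m2:ℚ)/(align:ℚ))) * align :=
      mul_le_mul_of_nonneg_right hr (le_of_lt hpos)
    exact max_le_max (le_refl _) hm

lemma pvSample_mono {low high count align : Int} (hlh : low < high) (hc : 1 < count)
    {i j : Int} (h : i ≤ j) :
    pvSample low high count align i ≤ pvSample low high count align j := by
  apply alignedPy_mono
  have hc1 : (0:ℚ) < ((count - 1 : Int) : ℚ) := by
    have : (0:Int) < count - 1 := by omega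
    exact_mod_cast this
  have hq : (i : ℚ) / ((count - 1 : Int) : ℚ) ≤ (j : ℚ) / ((count - 1 : Int) : ℚ) := by
    rw [div_eq_mul_inv, div_eq_mul_inv]
    exact mul_le_mul_of_nonneg_right (by exact_mod_cast h) (inv_nonneg.mpr (le_of_lt hc1))
  have hsp : (0:ℚ) ≤ ((high - low : Int) : ℚ) := by
    have : (0:Int) ≤ high - low := by omega
    exact_mod_cast this
  have h2 : ((high - low : Int) : ℚ) * pvRnd ((i : ℚ) / ((count - 1 : Int) : ℚ))
      ≤ ((high - low : Int) : ℚ) * pvRnd ((j : ℚ) / ((count - 1 : Int) : ℚ)) :=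
    mul_le_mul_of_nonneg_left (pvRnd_mono hq) hsp
  have := pvTrunc_mono (pvRnd_mono h2)
  omega

-- in a strictly sorted list, a member that bounds every element from below is the head
lemma head?_of_min {l : List Int} (hp : l.Pairwise (· < ·)) {v : Int}
    (hv : v ∈ l) (hmin : ∀ a ∈ l, v ≤ a) : l.head? = some v := by
  cases l with
  | nil => simp at hv
  | cons h t =>
    have : v = h := by
      rcases List.mem_cons.mp hv with rfl | hvt
      · rfl
      · have h1 : h < v := (List.pairwise_cons.mp hp).1 v hvt
        have h2 : v ≤ h := hmin h List.mem_cons_self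
        omega
    simp [this]

-- the prepend-unless-head foldr over a non-decreasing list yields its strictly
-- increasing deduplication, with the same members
lemma foldr_dedup : ∀ (xs : List Int), xs.Pairwise (· ≤ ·) →
    (xs.foldr (fun v out => if out.head? = some v then out else v :: out) []).Pairwise (· < ·)
    ∧ ∀ y, (y ∈ xs.foldr (fun v out => if out.head? = some v then out else v :: out) [] ↔ y ∈ xs) := by
  intro xs
  induction xs with
  | nil => intro _; exact ⟨List.Pairwise.nil, fun y => by simp⟩
  | cons v rest ih =>
    intro h
    obtain ⟨hvle, hrest⟩ := List.pairwise_cons.mp h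
    obtain ⟨hp, hm⟩ := ih hrest
    set ys := rest.foldr (fun v out => if out.head? = some v then out else v :: out) [] with hys
    have hge : ∀ a ∈ ys, v ≤ a := fun a ha => hvle a ((hm a).mp ha)
    simp only [List.foldr_cons, ← hys]
    by_cases hc : ys.head? = some v
    · rw [if_pos hc]
      refine ⟨hp, fun y => ?_⟩
      rw [hm y, List.mem_cons]
      constructor
      · exact Or.inr
      · rintro (rfl | hy)
        · exact (hm _).mp (List.mem_of_mem_head? hc)
        · exact hy
    · rw [if_neg hc]
      have hlt : ∀ a ∈ ys, v < a := by
        intro a ha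
        rcases lt_or_eq_of_le (hge a ha) with h' | h'
        · exact h'
        · exact absurd (head?_of_min hp (h' ▸ ha) hge) hc
      refine ⟨List.pairwise_cons.mpr ⟨hlt, hp⟩, fun y => ?_⟩
      rw [List.mem_cons, List.mem_cons, hm y]

-- ===== VERDICT (by name: the statement is the Claim_ definition above) =====
theorem sample_sizes_py_spec : Claim_equal_sample_sizes_py := by
  intro low_mb high_mb count align_mb _ _
  unfold Spec_sample_sizes_py sample_sizes_py sample_sizes_py_alt
  by_cases hguard : count ≤ 1 ∨ low_mb ≥ high_mb
  · rw [if_pos hguard, if_pos hguard]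
  · rw [if_neg hguard, if_neg hguard]
    push_neg at hguard
    obtain ⟨hc, hlh⟩ := hguard
    have hA : (PySem.List.pyRange 0 count 1).foldl
        (fun s (i : Int) => PySem.Set.add s (pvSample low_mb high_mb count align_mb i)) PySem.Set.empty
        = PySem.Set.ofList ((PySem.List.pyRange 0 count 1).map (pvSample low_mb high_mb count align_mb)) := by
      rw [PySem.Set.ofList_eq_foldl, List.foldl_map]
      rfl
    have hB : ((PySem.List.pyRange 0 count 1).reverse).foldl
        (fun out (i : Int) =>
          if out.head? = some (pvSample low_mb high_mb count align_mb i) then out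
          else pvSample low_mb high_mb count align_mb i :: out) []
        = ((PySem.List.pyRange 0 count 1).map (pvSample low_mb high_mb count align_mb)).foldr
            (fun v out => if out.head? = some v then out else v :: out) [] := by
      rw [List.foldl_reverse, List.foldr_map]
    show PySem.List.sorted
        ((PySem.List.pyRange 0 count 1).foldl
          (fun s (i : Int) => PySem.Set.add s (pvSample low_mb high_mb count align_mb i)) PySem.Set.empty)
        (fun x => x) false
      = ((PySem.List.pyRange 0 count 1).reverse).foldl
          (fun out (i : Int) =>
            if out.head? = some (pvSample low_mb high_mb count align_mb i) then out
            else pvSample low_mb high_mb count align_mb i :: out) []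
    rw [hA, hB]
    set xs : List Int := (PySem.List.pyRange 0 count 1).map (pvSample low_mb high_mb count align_mb) with hxs
    have hxs_pw : xs.Pairwise (· ≤ ·) := by
      rw [hxs]
      apply List.Pairwise.map
      · intro a b hab
        exact pvSample_mono hlh hc (le_of_lt hab)
      · exact PySem.List.pairwise_lt_pyRange_one 0 count
    obtain ⟨hp, hm⟩ := foldr_dedup xs hxs_pw
    set ys := xs.foldr (fun v out => if out.head? = some v then out else v :: out) [] with hys
    have hnodup_ys : ys.Nodup := hp.imp ne_of_lt
    have hnodup_set : (PySem.Set.ofList xs).Nodup := PySem.Set.nodup_ofList xs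
    have hperm : ys.Perm (PySem.Set.ofList xs) := by
      rw [List.perm_ext_iff_of_nodup hnodup_ys hnodup_set]
      intro a
      rw [hm a, PySem.Set.mem_ofList]
    exact PySem.List.sorted_eq_of_perm_of_pairwise_lt _ _ _ hperm hp
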